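-- pv_equiv track=rewrite | github.com/surrvezh/googleAiConnect | agent/tools/code_generator.py | _extract_explanation
-- ===== SOURCE A (Python) =====
-- def _extract_explanation(llm_response: str) -> str:
--     """Extract explanation from LLM response"""
--     # Look for explanation section
--     if "EXPLANATION:" in llm_response:
--         parts = llm_response.split("EXPLANATION:")
--         explanation_section = parts[1] if len(parts) > 1 else ""
--
--         # Get text until next section
--         end_markers = ["ADDITIONAL NOTES:", "```", "---"]
--         for marker in end_markers:
--             if marker in explanation_section:
--                 explanation_section = explanation_section.split(marker)[0]
--
--         return explanation_section.strip()
--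
--     # Fallback: return part of the response
--     return llm_response[:200] + "..."
-- ===== SOURCE B (Python) =====
-- def _extract_explanation(llm_response: str) -> str:
--     """Extract explanation from LLM response"""
--     if "EXPLANATION:" not in llm_response:
--         # Fallback: return part of the response
--         return llm_response[:200] + "..."
--     section = llm_response.split("EXPLANATION:")[1]
--     # Cut once, at the earliest end marker that occurs (if any)
--     cuts = [i for i in (section.find(m) for m in ("ADDITIONAL NOTES:", "```", "---")) if i != -1]
--     end = min(cuts, default=len(section))
--     return section[:end].strip()
-- ===== Notes on version B (the rewrite author's own statement) =====
-- stated objective: simpler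
-- what changed: Replaces A's loop that repeatedly re-splits the section at each end marker with a single pass that computes the first occurrence index of each marker via find, takes the minimum found index (or the section length), and slices once.
import Mathlib
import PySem

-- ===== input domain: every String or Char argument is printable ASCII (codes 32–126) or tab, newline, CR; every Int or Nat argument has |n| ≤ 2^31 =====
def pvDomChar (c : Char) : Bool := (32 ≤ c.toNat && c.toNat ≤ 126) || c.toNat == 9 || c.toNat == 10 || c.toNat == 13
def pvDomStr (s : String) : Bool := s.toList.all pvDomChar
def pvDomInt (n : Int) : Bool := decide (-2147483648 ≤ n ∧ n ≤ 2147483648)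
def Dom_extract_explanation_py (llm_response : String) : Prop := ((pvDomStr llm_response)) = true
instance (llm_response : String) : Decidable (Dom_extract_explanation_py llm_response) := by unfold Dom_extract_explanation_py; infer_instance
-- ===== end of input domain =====

-- B replaces A's loop of repeated re-splits by taking the minimum first-occurrence
-- index of the end markers and slicing once (objective: simpler).


-- ===== PORT A =====
def extract_explanation_py (llm_response : String) : String :=
  if PySem.Str.isIn "EXPLANATION:" llm_response = true then
    let parts := (PySem.Str.split? llm_response "EXPLANATION:").getD []
    let explanation_section := if parts.length > 1 then (PySem.List.pyGet? parts 1).getD "" else ""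
    let explanation_section := ["ADDITIONAL NOTES:", "```", "---"].foldl
      (fun sec marker =>
        if PySem.Str.isIn marker sec = true then
          ((PySem.Str.split? sec marker).getD []).headD ""
        else sec) explanation_section
    PySem.Str.strip explanation_section
  else
    PySem.Str.slice llm_response none (some 200) ++ "..."

-- ===== PORT B =====
def extract_explanation_py_alt (llm_response : String) : String :=
  if PySem.Str.isIn "EXPLANATION:" llm_response = false then
    PySem.Str.slice llm_response none (some 200) ++ "..."
  else
    let section_ := (PySem.List.pyGet? ((PySem.Str.split? llm_response "EXPLANATION:").getD []) 1).getD ""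
    let cuts := (["ADDITIONAL NOTES:", "```", "---"].map
      (fun m => PySem.Str.find section_ m)).filter (fun i => i != -1)
    let endIdx : Int := PySem.List.minD cuts (fun y => y) (PySem.Str.len section_)
    PySem.Str.strip (PySem.Str.slice section_ none (some endIdx))

-- ===== PRECONDITION & SPEC =====
def Spec_extract_explanation_py (llm_response : String) (out : String) : Prop := out = extract_explanation_py_alt llm_response
instance (llm_response : String) (out : String) : Decidable (Spec_extract_explanation_py llm_response out) := by unfold Spec_extract_explanation_py; infer_instance

-- ===== CLAIM (what is proved, stated in full; the proofs are below) =====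
def Claim_equal_extract_explanation_py : Prop := ∀ (llm_response : String), Dom_extract_explanation_py llm_response → Spec_extract_explanation_py llm_response (extract_explanation_py llm_response)

-- ===== LEMMAS AND PROOFS =====

-- find s sub = j exactly when the first full occurrence of sub in s is at index j
theorem pv_find_eq_coe_iff (s sub : List Char) (j : Nat) :
    PySem.Chars.find s sub = (j : Int) ↔
      sub <+: s.drop j ∧ ∀ i < j, ¬ sub <+: s.drop i := by
  constructor
  · intro h
    have h0 : 0 ≤ PySem.Chars.find s sub := by rw [h]; exact Int.natCast_nonneg j
    have hs := PySem.Chars.find_spec h0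
    have ht : (PySem.Chars.find s sub).toNat = j := by omega
    rw [ht] at hs; exact hs
  · rintro ⟨h1, h2⟩
    have hin : PySem.Chars.isIn sub s = true :=
      (PySem.Chars.exists_prefix_drop_iff_isIn sub s).mp ⟨j, h1⟩
    have h0 : 0 ≤ PySem.Chars.find s sub := by
      rw [PySem.Chars.find_nonneg_iff]
      exact (PySem.Chars.isIn_iff_infix sub s).mp hin
    have hs := PySem.Chars.find_spec h0
    have hge : j ≤ (PySem.Chars.find s sub).toNat := by
      by_contra hlt
      exact h2 _ (by omega) hs.1
    have hle : (PySem.Chars.find s sub).toNat ≤ j := by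
      by_contra hlt
      exact hs.2 j (by omega) h1
    omega

-- an occurrence fits inside s
theorem pv_find_fits (s sub : List Char) (h : 0 ≤ PySem.Chars.find s sub) :
    (PySem.Chars.find s sub).toNat + sub.length ≤ s.length := by
  have h1 := (PySem.Chars.find_spec h).1
  have h2 := PySem.Chars.find_le_length s sub
  have h3 := h1.length_le
  simp at h3; omega

theorem pv_prefix_take_drop_iff (sub s : List Char) (c j : Nat) (hsub : sub ≠ []) :
    sub <+: (s.take c).drop j ↔ sub <+: s.drop j ∧ j + sub.length ≤ c := by
  rw [List.drop_take, List.prefix_take_iff]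
  constructor
  · rintro ⟨h1, h2⟩
    refine ⟨h1, ?_⟩
    rcases Nat.lt_or_ge c j with h | h
    · have : sub.length = 0 := by omega
      exact absurd (List.eq_nil_of_length_eq_zero this) hsub
    · omega
  · rintro ⟨h1, h2⟩; exact ⟨h1, by omega⟩

-- find on a truncated string: the first occurrence survives iff it fits below the cut
theorem pv_find_take (s sub : List Char) (c : Nat) (hsub : sub ≠ []) :
    PySem.Chars.find (s.take c) sub =
      if 0 ≤ PySem.Chars.find s sub ∧ (PySem.Chars.find s sub).toNat + sub.length ≤ c
      then PySem.Chars.find s sub else -1 := by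
  split
  next hcond =>
    obtain ⟨h0, hfit⟩ := hcond
    have hs := PySem.Chars.find_spec h0
    have : PySem.Chars.find s sub = ((PySem.Chars.find s sub).toNat : Int) := by omega
    rw [this, pv_find_eq_coe_iff]
    constructor
    · rw [pv_prefix_take_drop_iff sub s c _ hsub]
      exact ⟨hs.1, hfit⟩
    · intro i hi hocc
      rw [pv_prefix_take_drop_iff sub s c _ hsub] at hocc
      exact hs.2 i hi hocc.1
  next hcond =>
    rw [PySem.Chars.find_eq_neg_one_iff]
    intro hinf
    have hin : PySem.Chars.isIn sub (s.take c) = true :=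
      (PySem.Chars.isIn_iff_infix _ _).mpr hinf
    obtain ⟨j, hj⟩ := (PySem.Chars.exists_prefix_drop_iff_isIn sub (s.take c)).mpr hin
    rw [pv_prefix_take_drop_iff sub s c _ hsub] at hj
    have hin' : PySem.Chars.isIn sub s = true :=
      (PySem.Chars.exists_prefix_drop_iff_isIn sub s).mp ⟨j, hj.1⟩
    have h0 : 0 ≤ PySem.Chars.find s sub := by
      rw [PySem.Chars.find_nonneg_iff]; exact (PySem.Chars.isIn_iff_infix sub s).mp hin'
    have hs := PySem.Chars.find_spec h0
    have hle : (PySem.Chars.find s sub).toNat ≤ j := by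
      by_contra hlt
      exact hs.2 j (by omega) hj.1
    exact hcond ⟨h0, by omega⟩

-- recursive description of Python's str.split for a non-empty separator
def pvSplit (sep : List Char) (l : List Char) : List (List Char) :=
  if h : PySem.Chars.isIn sep l = true ∧ sep ≠ [] then
    l.take (PySem.Chars.find l sep).toNat ::
      pvSplit sep (l.drop ((PySem.Chars.find l sep).toNat + sep.length))
  else [l]
termination_by l.length
decreasing_by
  have h0 : 0 ≤ PySem.Chars.find l sep := by
    have := (PySem.Chars.isIn_iff_infix sep l).mp h.1
    rw [← PySem.Chars.find_nonneg_iff] at this; exact this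
  have := pv_find_fits l sep h0
  have hs : 0 < sep.length := List.length_pos_iff.mpr h.2
  simp; omega

theorem pv_isIn_cons_iff (sep : List Char) (c : Char) (rest : List Char)
    (h : ¬ sep <+: (c :: rest)) :
    PySem.Chars.isIn sep (c :: rest) = PySem.Chars.isIn sep rest := by
  by_cases hin : PySem.Chars.isIn sep rest = true
  · rw [hin]
    obtain ⟨j, hj⟩ := (PySem.Chars.exists_prefix_drop_iff_isIn sep rest).mpr hin
    exact (PySem.Chars.exists_prefix_drop_iff_isIn sep (c :: rest)).mp
      ⟨j + 1, by simpa using hj⟩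
  · rw [Bool.not_eq_true] at hin
    rw [hin, ← Bool.not_eq_true]
    intro hcons
    obtain ⟨j, hj⟩ := (PySem.Chars.exists_prefix_drop_iff_isIn sep (c :: rest)).mpr hcons
    cases j with
    | zero => exact h (by simpa using hj)
    | succ j' =>
      have : sep <+: rest.drop j' := by simpa using hj
      rw [← Bool.not_eq_true] at hin
      exact hin ((PySem.Chars.exists_prefix_drop_iff_isIn sep rest).mp ⟨j', this⟩)

theorem pv_find_cons_of_not_prefix (sep : List Char) (c : Char) (rest : List Char)
    (h : ¬ sep <+: (c :: rest)) (hin : PySem.Chars.isIn sep rest = true) :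
    PySem.Chars.find (c :: rest) sep = PySem.Chars.find rest sep + 1 := by
  have h0 : 0 ≤ PySem.Chars.find rest sep := by
    rw [PySem.Chars.find_nonneg_iff]; exact (PySem.Chars.isIn_iff_infix _ _).mp hin
  have hs := PySem.Chars.find_spec h0
  have heq : PySem.Chars.find rest sep = ((PySem.Chars.find rest sep).toNat : Int) := by omega
  rw [heq]
  have : ((PySem.Chars.find rest sep).toNat : Int) + 1
      = (((PySem.Chars.find rest sep).toNat + 1 : Nat) : Int) := by push_cast; ring
  rw [this, pv_find_eq_coe_iff]
  constructor
  · simpa using hs.1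
  · intro i hi
    cases i with
    | zero => simpa using h
    | succ i' =>
      have := hs.2 i' (by omega)
      simpa using this

theorem pv_pvSplit_cons_not_prefix (sep : List Char) (c : Char) (rest : List Char)
    (hsep : sep ≠ []) (h : ¬ sep <+: (c :: rest)) :
    pvSplit sep (c :: rest) = (pvSplit sep rest).modifyHead (c :: ·) := by
  by_cases hin : PySem.Chars.isIn sep rest = true
  · have hcons : PySem.Chars.isIn sep (c :: rest) = true := by
      rw [pv_isIn_cons_iff sep c rest h]; exact hin
    have hf := pv_find_cons_of_not_prefix sep c rest h hin
    have h0 : 0 ≤ PySem.Chars.find rest sep := by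
      rw [PySem.Chars.find_nonneg_iff]; exact (PySem.Chars.isIn_iff_infix _ _).mp hin
    conv_lhs => rw [pvSplit]
    rw [dif_pos ⟨hcons, hsep⟩]
    conv_rhs => rw [pvSplit]
    rw [dif_pos ⟨hin, hsep⟩]
    have ht : (PySem.Chars.find (c :: rest) sep).toNat
        = (PySem.Chars.find rest sep).toNat + 1 := by omega
    rw [ht]
    have hd : (PySem.Chars.find rest sep).toNat + 1 + sep.length
        = ((PySem.Chars.find rest sep).toNat + sep.length) + 1 := by omega
    rw [hd, List.drop_succ_cons, List.take_succ_cons]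
    simp
  · have hcons : ¬ PySem.Chars.isIn sep (c :: rest) = true := by
      rw [pv_isIn_cons_iff sep c rest h]; exact hin
    rw [pvSplit, dif_neg (by tauto), pvSplit, dif_neg (by tauto)]
    rfl

theorem pv_pvSplit_prefix (sep l : List Char) (hsep : sep ≠ []) (h : sep <+: l) :
    pvSplit sep l = [] :: pvSplit sep (l.drop sep.length) := by
  have hin : PySem.Chars.isIn sep l = true :=
    (PySem.Chars.exists_prefix_drop_iff_isIn sep l).mp ⟨0, by simpa using h⟩
  have hf : PySem.Chars.find l sep = ((0 : Nat) : Int) := by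
    rw [pv_find_eq_coe_iff]
    exact ⟨by simpa using h, by omega⟩
  rw [pvSplit, dif_pos ⟨hin, hsep⟩, hf]
  simp

theorem pv_go_spec (sep : List Char) (hsep : sep ≠ []) :
    ∀ fuel (l cur : List Char) (acc : List (List Char)), l.length < fuel →
      PySem.Chars.splitOn.go sep fuel l cur acc =
        acc.reverse ++ (pvSplit sep l).modifyHead (cur.reverse ++ ·) := by
  intro fuel
  induction fuel with
  | zero => intro l cur acc h; omega
  | succ n ih =>
    intro l cur acc h
    cases l with
    | nil =>
      have hnin : ¬ (PySem.Chars.isIn sep [] = true ∧ sep ≠ []) := by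
        rintro ⟨hin, -⟩
        rw [PySem.Chars.isIn_iff_infix] at hin
        exact hsep (List.eq_nil_of_infix_nil hin)
      rw [pvSplit, dif_neg hnin]
      simp [PySem.Chars.splitOn.go]
    | cons c rest =>
      by_cases hpre : sep.isPrefixOf (c :: rest)
      · have hpre' : sep <+: (c :: rest) := List.isPrefixOf_iff_prefix.mp hpre
        have hstep : PySem.Chars.splitOn.go sep (n+1) (c::rest) cur acc =
            PySem.Chars.splitOn.go sep n ((c::rest).drop sep.length) [] (cur.reverse :: acc) := by
          simp [PySem.Chars.splitOn.go, hpre]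
        rw [hstep, ih _ _ _ (by
          have : 0 < sep.length := List.length_pos_iff.mpr hsep
          simp; simp at h; omega)]
        rw [pv_pvSplit_prefix sep (c::rest) hsep hpre']
        rcases hsplit : pvSplit sep (List.drop sep.length (c::rest)) with _ | ⟨p, ps⟩ <;> simp
      · have hpre' : ¬ sep <+: (c :: rest) := fun hh => hpre (List.isPrefixOf_iff_prefix.mpr hh)
        have hstep : PySem.Chars.splitOn.go sep (n+1) (c::rest) cur acc =
            PySem.Chars.splitOn.go sep n rest (c :: cur) acc := by
          simp [PySem.Chars.splitOn.go, hpre]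
        rw [hstep, ih _ _ _ (by simp at h ⊢; omega)]
        rw [pv_pvSplit_cons_not_prefix sep c rest hsep hpre']
        rcases pvSplit sep rest with _ | ⟨p, ps⟩
        · simp
        · simp

theorem pv_splitOn_eq_pvSplit (s sep : List Char) (hsep : sep ≠ []) :
    PySem.Chars.splitOn s sep = pvSplit sep s := by
  have := pv_go_spec sep hsep (s.length + 1) s [] [] (by omega)
  rw [PySem.Chars.splitOn, this]
  rcases pvSplit sep s with _ | ⟨p, ps⟩ <;> simp

theorem pv_splitOn_head (s sep : List Char) (hsep : sep ≠ [])
    (h : PySem.Chars.isIn sep s = true) :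
    (PySem.Chars.splitOn s sep).headD [] = s.take (PySem.Chars.find s sep).toNat := by
  rw [pv_splitOn_eq_pvSplit s sep hsep, pvSplit, dif_pos ⟨h, hsep⟩]
  rfl

theorem pv_splitOn_ne_nil (s sep : List Char) (hsep : sep ≠ []) :
    PySem.Chars.splitOn s sep ≠ [] := by
  rw [pv_splitOn_eq_pvSplit s sep hsep, pvSplit]
  split <;> simp

-- an occurrence of m' cannot straddle an occurrence of m at c when m's head is no char of m'
theorem pv_no_straddle (s m m' : List Char) (c j : Nat) (hm : m ≠ [])
    (hocc : m <+: s.drop c) (hocc' : m' <+: s.drop j) (hj : j ≤ c)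
    (hnot : m.headD ' ' ∉ m') : j + m'.length ≤ c := by
  by_contra hlt
  rw [Nat.not_le] at hlt
  have hcj : c - j < m'.length := by omega
  have hmpos : 0 < m.length := List.length_pos_iff.mpr hm
  have hdropc : c < s.length := by
    have := hocc.length_le
    simp at this
    omega
  have hs1 : m[0] = s[c] := by
    have := hocc.getElem (i := 0) (by omega)
    rw [this, List.getElem_drop]
    simp
  have hlen' : c - j < (List.drop j s).length := by simp; omega
  have hs2 : m'[c - j] = s[c] := by
    have := hocc'.getElem (i := c - j) hcj
    rw [this, List.getElem_drop]
    congr 1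
    omega
  have hmem : m.headD ' ' ∈ m' := by
    have hhead : m.headD ' ' = m[0] := by
      cases m with
      | nil => simp at hm
      | cons a t => rfl
    rw [hhead, hs1, ← hs2]
    exact List.getElem_mem _
  exact hnot hmem

-- A's one marker cut step, character level
def pvCutA (t m : List Char) : List Char :=
  if PySem.Chars.isIn m t = true then (PySem.Chars.splitOn t m).headD [] else t

def pvNewcut (s m : List Char) (c : Nat) : Nat :=
  if 0 ≤ PySem.Chars.find s m then min c (PySem.Chars.find s m).toNat else c

theorem pv_cut_take (s m : List Char) (ms : List (List Char)) (c : Nat) (hm : m ≠ [])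
    (hc : c ≤ s.length)
    (hinv : c = s.length ∨ ∃ mp ∈ ms, mp <+: s.drop c)
    (hne : ∀ mp ∈ ms, mp ≠ [])
    (hdis : ∀ mp ∈ ms, mp.headD ' ' ∉ m) :
    pvCutA (s.take c) m = s.take (pvNewcut s m c) := by
  have hft := pv_find_take s m c hm
  by_cases h0 : 0 ≤ PySem.Chars.find s m
  · by_cases hfit : (PySem.Chars.find s m).toNat + m.length ≤ c
    · rw [if_pos ⟨h0, hfit⟩] at hft
      have hin : PySem.Chars.isIn m (s.take c) = true := by
        rw [← Bool.not_eq_false, PySem.Chars.isIn_eq_false_iff,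
          ← PySem.Chars.find_eq_neg_one_iff, hft]
        omega
      rw [pvCutA, if_pos hin, pv_splitOn_head _ _ hm hin, hft, List.take_take]
      rw [pvNewcut, if_pos h0]
      congr 1
      omega
    · have hcle : c ≤ (PySem.Chars.find s m).toNat := by
        rcases hinv with rfl | ⟨mp, hmp, hoccp⟩
        · have := pv_find_fits s m h0; omega
        · by_contra hlt
          have hocc' := (PySem.Chars.find_spec h0).1
          have := pv_no_straddle s mp m c (PySem.Chars.find s m).toNat
            (hne mp hmp) hoccp hocc' (by omega) (hdis mp hmp)
          omega
      rw [if_neg (by omega)] at hft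
      have hnin : PySem.Chars.isIn m (s.take c) = false := by
        rw [PySem.Chars.isIn_eq_false_iff, ← PySem.Chars.find_eq_neg_one_iff]; exact hft
      rw [pvCutA, hnin]
      simp only [Bool.false_eq_true, if_false]
      rw [pvNewcut, if_pos h0]
      congr 1
      omega
  · rw [if_neg (by tauto)] at hft
    have hnin : PySem.Chars.isIn m (s.take c) = false := by
      rw [PySem.Chars.isIn_eq_false_iff, ← PySem.Chars.find_eq_neg_one_iff]; exact hft
    rw [pvCutA, hnin]
    simp only [Bool.false_eq_true, if_false]
    rw [pvNewcut, if_neg h0]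

theorem pv_newcut_le (s m : List Char) (c : Nat) : pvNewcut s m c ≤ c := by
  unfold pvNewcut; split <;> omega

theorem pv_newcut_inv (s m : List Char) (ms : List (List Char)) (c : Nat)
    (hinv : c = s.length ∨ ∃ mp ∈ ms, mp <+: s.drop c) :
    pvNewcut s m c = s.length ∨ ∃ mp ∈ (m :: ms), mp <+: s.drop (pvNewcut s m c) := by
  unfold pvNewcut
  by_cases h0 : 0 ≤ PySem.Chars.find s m
  · rw [if_pos h0]
    by_cases hle : (PySem.Chars.find s m).toNat ≤ c
    · right
      refine ⟨m, List.mem_cons_self, ?_⟩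
      have : min c (PySem.Chars.find s m).toNat = (PySem.Chars.find s m).toNat := by omega
      rw [this]
      exact (PySem.Chars.find_spec h0).1
    · have : min c (PySem.Chars.find s m).toNat = c := by omega
      rw [this]
      rcases hinv with h | ⟨mp, hmp, hp⟩
      · exact Or.inl h
      · exact Or.inr ⟨mp, List.mem_cons_of_mem _ hmp, hp⟩
  · rw [if_neg h0]
    rcases hinv with h | ⟨mp, hmp, hp⟩
    · exact Or.inl h
    · exact Or.inr ⟨mp, List.mem_cons_of_mem _ hmp, hp⟩

-- string-level view of A's cut step
theorem pv_toList_cut (sec m : String) (hm : m.toList ≠ []) :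
    (if PySem.Str.isIn m sec = true then ((PySem.Str.split? sec m).getD []).headD "" else sec).toList
      = pvCutA sec.toList m.toList := by
  have hb : PySem.Str.isIn m sec = PySem.Chars.isIn m.toList sec.toList := by simp [pysem]
  by_cases h : PySem.Str.isIn m sec = true
  · rw [if_pos h, pvCutA, if_pos (by rw [← hb]; exact h)]
    have hsplit : (PySem.Str.split? sec m).getD []
        = (PySem.Chars.splitOn sec.toList m.toList).map String.ofList := by
      simp [PySem.Str.split?, PySem.Chars.split?, (by simpa using hm : ¬ m.toList.isEmpty = true)]
    rw [hsplit]
    have hne := pv_splitOn_ne_nil sec.toList m.toList hm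
    rcases h' : PySem.Chars.splitOn sec.toList m.toList with _ | ⟨p, ps⟩
    · exact absurd h' hne
    · simp
  · rw [if_neg h, pvCutA, if_neg (by rw [← hb]; exact h)]

-- find = -1 or ≥ 0
theorem pv_find_cases (s sub : List Char) :
    PySem.Chars.find s sub = -1 ∨ 0 ≤ PySem.Chars.find s sub := by
  have := PySem.Chars.neg_one_le_find s sub
  omega

-- the heart: A's three sequential cuts equal one cut at the minimum found index
theorem pv_core (s : List Char) :
    pvCutA (pvCutA (pvCutA s "ADDITIONAL NOTES:".toList) "```".toList) "---".toList
      = s.take (PySem.List.minD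
            ([PySem.Chars.find s "ADDITIONAL NOTES:".toList,
              PySem.Chars.find s "```".toList,
              PySem.Chars.find s "---".toList].filter (fun i => i != -1)) (fun y => y)
            ((s.length : Nat) : Int)).toNat := by
  have hne1 : ∀ mp ∈ ["ADDITIONAL NOTES:".toList], mp ≠ ([] : List Char) := by
    intro mp hmp; simp at hmp; subst hmp; decide
  have hne2 : ∀ mp ∈ ["```".toList, "ADDITIONAL NOTES:".toList], mp ≠ ([] : List Char) := by
    intro mp hmp; simp at hmp; rcases hmp with rfl | rfl <;> decide
  have hdis1 : ∀ mp ∈ ["ADDITIONAL NOTES:".toList], mp.headD ' ' ∉ "```".toList := by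
    intro mp hmp; simp at hmp; subst hmp; decide
  have hdis2 : ∀ mp ∈ ["```".toList, "ADDITIONAL NOTES:".toList], mp.headD ' ' ∉ "---".toList := by
    intro mp hmp; simp at hmp; rcases hmp with rfl | rfl <;> decide
  have e1 : pvCutA s "ADDITIONAL NOTES:".toList
      = s.take (pvNewcut s "ADDITIONAL NOTES:".toList s.length) := by
    have := pv_cut_take s "ADDITIONAL NOTES:".toList [] s.length (by decide)
      (Nat.le_refl _) (Or.inl rfl) (by simp) (by simp)
    rw [List.take_length] at this; exact this
  have hc1le := pv_newcut_le s "ADDITIONAL NOTES:".toList s.length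
  have inv1 := pv_newcut_inv s "ADDITIONAL NOTES:".toList [] s.length (Or.inl rfl)
  have e2 : pvCutA (s.take (pvNewcut s "ADDITIONAL NOTES:".toList s.length)) "```".toList
      = s.take (pvNewcut s "```".toList (pvNewcut s "ADDITIONAL NOTES:".toList s.length)) :=
    pv_cut_take s "```".toList ["ADDITIONAL NOTES:".toList] _ (by decide)
      (by omega) inv1 hne1 hdis1
  have hc2le := pv_newcut_le s "```".toList (pvNewcut s "ADDITIONAL NOTES:".toList s.length)
  have inv2 := pv_newcut_inv s "```".toList ["ADDITIONAL NOTES:".toList] _ inv1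
  have e3 : pvCutA (s.take (pvNewcut s "```".toList (pvNewcut s "ADDITIONAL NOTES:".toList s.length))) "---".toList
      = s.take (pvNewcut s "---".toList (pvNewcut s "```".toList (pvNewcut s "ADDITIONAL NOTES:".toList s.length))) :=
    pv_cut_take s "---".toList ["```".toList, "ADDITIONAL NOTES:".toList] _ (by decide)
      (by omega) inv2 hne2 hdis2
  rw [e1, e2, e3]
  -- both sides are takes of s; compare the indices
  have hl1 := PySem.Chars.find_le_length s "ADDITIONAL NOTES:".toList
  have hl2 := PySem.Chars.find_le_length s "```".toList
  have hl3 := PySem.Chars.find_le_length s "---".toList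
  rcases pv_find_cases s "ADDITIONAL NOTES:".toList with h1 | h1 <;>
    rcases pv_find_cases s "```".toList with h2 | h2 <;>
      rcases pv_find_cases s "---".toList with h3 | h3
  all_goals (
    first
    | (have hb1 : (PySem.Chars.find s "ADDITIONAL NOTES:".toList != -1) = false := by
        rw [h1]; decide)
    | (have hb1 : (PySem.Chars.find s "ADDITIONAL NOTES:".toList != -1) = true := by
        rw [bne_iff_ne]; omega))
  all_goals (
    first
    | (have hb2 : (PySem.Chars.find s "```".toList != -1) = false := by rw [h2]; decide)
    | (have hb2 : (PySem.Chars.find s "```".toList != -1) = true := by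
        rw [bne_iff_ne]; omega))
  all_goals (
    first
    | (have hb3 : (PySem.Chars.find s "---".toList != -1) = false := by rw [h3]; decide)
    | (have hb3 : (PySem.Chars.find s "---".toList != -1) = true := by
        rw [bne_iff_ne]; omega))
  all_goals simp only [List.filter, hb1, hb2, hb3]
  all_goals (try simp only [PySem.List.minD_id_cons, List.foldl])
  all_goals (
    try simp only [show ∀ d : Int, PySem.List.minD ([] : List Int) (fun y => y) d = d
      from fun _ => rfl])
  all_goals (congr 1; unfold pvNewcut; split_ifs <;> omega)

theorem pv_end_nonneg (s : List Char) :
    0 ≤ PySem.List.minD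
        ([PySem.Chars.find s "ADDITIONAL NOTES:".toList,
          PySem.Chars.find s "```".toList,
          PySem.Chars.find s "---".toList].filter (fun i => i != -1)) (fun y => y)
        ((s.length : Nat) : Int) := by
  have hall : ∀ x ∈ ([PySem.Chars.find s "ADDITIONAL NOTES:".toList,
      PySem.Chars.find s "```".toList,
      PySem.Chars.find s "---".toList].filter (fun i => i != -1)), (0:Int) ≤ x := by
    intro x hx
    rw [List.mem_filter, bne_iff_ne] at hx
    have := PySem.Chars.neg_one_le_find s "ADDITIONAL NOTES:".toList
    have := PySem.Chars.neg_one_le_find s "```".toList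
    have := PySem.Chars.neg_one_le_find s "---".toList
    have hx1 := hx.1
    have hx2 := hx.2
    simp only [List.mem_cons, List.not_mem_nil, or_false] at hx1
    rcases hx1 with rfl | rfl | rfl <;> omega
  rcases hL : ([PySem.Chars.find s "ADDITIONAL NOTES:".toList,
      PySem.Chars.find s "```".toList,
      PySem.Chars.find s "---".toList].filter (fun i => i != -1)) with _ | ⟨x, t⟩
  · exact Int.natCast_nonneg s.length
  · rw [PySem.List.minD_id_cons]
    rcases PySem.List.foldl_min_mem t x with h | h
    · rw [h]; exact hall x (by rw [hL]; exact List.mem_cons_self)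
    · exact hall _ (by rw [hL]; exact List.mem_cons_of_mem _ h)

-- ===== VERDICT (by name: the statement is the Claim_ definition above) =====
theorem extract_explanation_py_spec : Claim_equal_extract_explanation_py := by
  intro r _
  unfold Spec_extract_explanation_py extract_explanation_py extract_explanation_py_alt
  by_cases hin : PySem.Str.isIn "EXPLANATION:" r = true
  · rw [if_pos hin, if_neg (by rw [hin]; simp)]
    -- A's guarded parts[1] equals B's direct parts[1]-with-default
    have hsec : (if ((PySem.Str.split? r "EXPLANATION:").getD []).length > 1
        then (PySem.List.pyGet? ((PySem.Str.split? r "EXPLANATION:").getD []) 1).getD ""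
        else "")
        = (PySem.List.pyGet? ((PySem.Str.split? r "EXPLANATION:").getD []) 1).getD "" := by
      split
      next => rfl
      next hlen =>
        have h1 : PySem.List.pyGet? ((PySem.Str.split? r "EXPLANATION:").getD []) 1
            = ((PySem.Str.split? r "EXPLANATION:").getD [])[1]? := by simp [pysem]
        rw [h1, List.getElem?_eq_none (by omega)]
        rfl
    simp only [List.foldl, List.map, hsec]
    generalize (PySem.List.pyGet? ((PySem.Str.split? r "EXPLANATION:").getD []) 1).getD "" = sec
    refine congrArg PySem.Str.strip ?_
    apply String.toList_inj.mp
    rw [pv_toList_cut _ "---" (by decide), pv_toList_cut _ "```" (by decide),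
        pv_toList_cut _ "ADDITIONAL NOTES:" (by decide)]
    rw [PySem.Str.find_eq sec "ADDITIONAL NOTES:", PySem.Str.find_eq sec "```",
        PySem.Str.find_eq sec "---",
        show PySem.Str.len sec = ((sec.toList.length : Nat) : Int) from rfl]
    have hend : ∀ e : Int, 0 ≤ e →
        (PySem.Str.slice sec none (some e)).toList = sec.toList.take e.toNat := by
      intro e he
      have h : (PySem.Str.slice sec none (some e)).toList
          = PySem.List.slice sec.toList none (some e) := by simp [pysem]
      rw [h, PySem.List.slice_to _ he]
    rw [hend _ (pv_end_nonneg sec.toList)]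
    exact pv_core sec.toList
  · rw [if_neg hin, if_pos (by simpa using hin)]
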